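-- pv_equiv track=rewrite | github.com/MrBrantCode/unitest_baseline | mut_generate/mist_train_cf/cf_83311/solution.py | replace_punctuation_with_phrases
-- ===== SOURCE A (Python) =====
-- def replace_punctuation_with_phrases(text):
--     """
--     Replaces punctuation marks in a given text with their corresponding phrases in English.
--
--     Args:
--     text (str): The input text.
--
--     Returns:
--     str: The text with all punctuation marks replaced by their corresponding phrases.
--     """
--
--     # Map each punctuation mark to its corresponding word
--     punctuation_dict = {
--         "!": " exclamation mark",
--         ".": " full stop",
--         ",": " comma",
--         "?": " question mark",
--         ";": " semicolon",
--         ":": " colon",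
--         "-": " hyphen",
--         "'": " apostrophe",
--         '"': " double quotes",
--         "(": " left parenthesis",
--         ")": " right parenthesis",
--         "{": " left curly brace",
--         "}": " right curly brace",
--         "[": " left square bracket",
--         "]": " right square bracket",
--         "<": " less than",
--         ">": " greater than",
--     }
--
--     # Replace each punctuation mark in the text with its corresponding word
--     for punctuation, phrase in punctuation_dict.items():
--         text = text.replace(punctuation, phrase)
--
--     return text
-- ===== SOURCE B (Python) =====
-- def replace_punctuation_with_phrases(text):
--     def phrase(ch):
--         if ch == '!':
--             return ' exclamation mark'
--         elif ch == '.':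
--             return ' full stop'
--         elif ch == ',':
--             return ' comma'
--         elif ch == '?':
--             return ' question mark'
--         elif ch == ';':
--             return ' semicolon'
--         elif ch == ':':
--             return ' colon'
--         elif ch == '-':
--             return ' hyphen'
--         elif ch == "'":
--             return ' apostrophe'
--         elif ch == '"':
--             return ' double quotes'
--         elif ch == '(':
--             return ' left parenthesis'
--         elif ch == ')':
--             return ' right parenthesis'
--         elif ch == '{':
--             return ' left curly brace'
--         elif ch == '}':
--             return ' right curly brace'
--         elif ch == '[':
--             return ' left square bracket'
--         elif ch == ']':
--             return ' right square bracket'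
--         elif ch == '<':
--             return ' less than'
--         elif ch == '>':
--             return ' greater than'
--         else:
--             return ch
--
--     parts = []
--     for ch in text:
--         parts.append(phrase(ch))
--     return ''.join(parts)
-- ===== Notes on version B (the rewrite author's own statement) =====
-- stated objective: alternative
-- what changed: Replaced 17 sequential full-string .replace passes over a dict with a single left-to-right pass that maps each character through an explicit if/elif phrase table and joins the pieces (exact because no replacement phrase contains a punctuation key, so A's sequential replaces never cascade).
import Mathlib
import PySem

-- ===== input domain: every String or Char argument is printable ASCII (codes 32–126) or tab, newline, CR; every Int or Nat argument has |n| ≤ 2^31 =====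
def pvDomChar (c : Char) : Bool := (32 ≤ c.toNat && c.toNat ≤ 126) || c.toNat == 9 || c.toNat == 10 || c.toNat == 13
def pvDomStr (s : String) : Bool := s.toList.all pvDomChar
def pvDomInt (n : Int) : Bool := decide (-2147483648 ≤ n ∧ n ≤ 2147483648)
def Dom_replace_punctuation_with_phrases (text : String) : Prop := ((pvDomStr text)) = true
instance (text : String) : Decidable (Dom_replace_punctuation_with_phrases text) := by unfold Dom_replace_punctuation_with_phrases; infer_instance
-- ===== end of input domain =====

-- B makes a single pass that maps each character through an explicit if/elif phrase table and
-- joins the pieces, instead of A's 17 sequential full-string replace passes over a dict;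
-- exact because no phrase contains a punctuation key, so A's replaces never cascade.

-- ===== PORT A =====
-- A's punctuation-to-phrase dict literal, in the Python insertion order
def pvPunctDictA : PySem.Dict String String := PySem.Dict.ofList
  [("!", " exclamation mark"), (".", " full stop"), (",", " comma"),
   ("?", " question mark"), (";", " semicolon"), (":", " colon"),
   ("-", " hyphen"), ("'", " apostrophe"), ("\"", " double quotes"),
   ("(", " left parenthesis"), (")", " right parenthesis"),
   ("{", " left curly brace"), ("}", " right curly brace"),
   ("[", " left square bracket"), ("]", " right square bracket"),
   ("<", " less than"), (">", " greater than")]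

-- for punctuation, phrase in punctuation_dict.items(): text = text.replace(punctuation, phrase)
def replace_punctuation_with_phrases (text : String) : String :=
  pvPunctDictA.items.foldl (fun t pp => PySem.Str.replace t pp.1 pp.2) text

-- ===== PORT B =====
-- def phrase(ch): if ch == '!': … elif … else: return ch
def pvPhrase (ch : Char) : String :=
  if ch = '!' then " exclamation mark"
  else if ch = '.' then " full stop"
  else if ch = ',' then " comma"
  else if ch = '?' then " question mark"
  else if ch = ';' then " semicolon"
  else if ch = ':' then " colon"
  else if ch = '-' then " hyphen"
  else if ch = '\'' then " apostrophe"
  else if ch = '"' then " double quotes"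
  else if ch = '(' then " left parenthesis"
  else if ch = ')' then " right parenthesis"
  else if ch = '{' then " left curly brace"
  else if ch = '}' then " right curly brace"
  else if ch = '[' then " left square bracket"
  else if ch = ']' then " right square bracket"
  else if ch = '<' then " less than"
  else if ch = '>' then " greater than"
  else String.ofList [ch]

-- parts = []; for ch in text: parts.append(phrase(ch)); return ''.join(parts)
def replace_punctuation_with_phrases_alt (text : String) : String :=
  PySem.Str.join "" (text.toList.foldl (fun parts ch => parts ++ [pvPhrase ch]) [])

-- ===== PRECONDITION & SPEC =====
def Spec_replace_punctuation_with_phrases (text : String) (out : String) : Prop := out = replace_punctuation_with_phrases_alt text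
instance (text : String) (out : String) : Decidable (Spec_replace_punctuation_with_phrases text out) := by unfold Spec_replace_punctuation_with_phrases; infer_instance

-- ===== CLAIM (what is proved, stated in full; the proofs are below) =====
def Claim_equal_replace_punctuation_with_phrases : Prop := ∀ (text : String), Dom_replace_punctuation_with_phrases text → Spec_replace_punctuation_with_phrases text (replace_punctuation_with_phrases text)

-- ===== LEMMAS AND PROOFS =====

-- single-character replace is the character-wise flatMap
theorem pv_go_single (p : Char) (r : List Char) :
    ∀ (l : List Char) (fuel : Nat) (acc : List Char), l.length ≤ fuel →
      PySem.Chars.replace.go [p] r fuel l acc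
        = acc.reverse ++ l.flatMap (fun ch => if ch = p then r else [ch]) := by
  intro l
  induction l with
  | nil => intro fuel acc h; cases fuel <;> simp [PySem.Chars.replace.go]
  | cons c t ih =>
    intro fuel acc h
    cases fuel with
    | zero => simp at h
    | succ n =>
      simp only [PySem.Chars.replace.go, List.isPrefixOf, List.length_cons] at *
      by_cases hc : c = p
      · subst hc
        simp only [BEq.rfl, Bool.true_and, if_pos, List.drop_succ_cons,
          List.length_nil, List.drop_zero]
        rw [ih n (r.reverse ++ acc) (by omega)]
        simp
      · have : (p == c) = false := by simp; exact fun h' => hc h'.symm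
        simp only [this, Bool.false_and, Bool.false_eq_true, if_false]
        rw [ih n (c :: acc) (by omega)]
        simp [hc]

theorem pv_replace_single (l : List Char) (p : Char) (r : List Char) :
    PySem.Chars.replace l [p] r = l.flatMap (fun ch => if ch = p then r else [ch]) := by
  simpa [PySem.Chars.replace] using pv_go_single p r l l.length [] le_rfl

theorem pv_intersperse_nil (parts : List (List Char)) :
    (List.intersperse ([] : List Char) parts).flatten = parts.flatten := by
  induction parts with
  | nil => rfl
  | cons a as ih => cases as <;> simp_all [List.intersperse]

-- the append-accumulator loop of B is a map
theorem pv_foldl_append_map (l : List Char) (acc : List String) :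
    l.foldl (fun parts ch => parts ++ [pvPhrase ch]) acc = acc ++ l.map pvPhrase := by
  induction l generalizing acc with
  | nil => simp
  | cons c t ih => simp [ih]

-- ===== VERDICT (by name: the statement is the Claim_ definition above) =====
theorem replace_punctuation_with_phrases_spec : Claim_equal_replace_punctuation_with_phrases := by
  intro text _
  unfold Spec_replace_punctuation_with_phrases
  apply String.toList_inj.mp
  have hA : pvPunctDictA.items = [("!", " exclamation mark"), (".", " full stop"), (",", " comma"),
   ("?", " question mark"), (";", " semicolon"), (":", " colon"),
   ("-", " hyphen"), ("'", " apostrophe"), ("\"", " double quotes"),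
   ("(", " left parenthesis"), (")", " right parenthesis"),
   ("{", " left curly brace"), ("}", " right curly brace"),
   ("[", " left square bracket"), ("]", " right square bracket"),
   ("<", " less than"), (">", " greater than")] := by decide
  simp only [replace_punctuation_with_phrases, replace_punctuation_with_phrases_alt, hA,
    List.foldl_cons, List.foldl_nil]
  rw [pv_foldl_append_map]
  simp only [PySem.Str.toList_replace, PySem.Str.toList_join]
  simp only [List.map_map, List.nil_append, String.toList_empty, String.reduceToList]
  simp only [pv_replace_single, List.flatMap_assoc]
  rw [List.flatMap_def]
  simp only [PySem.Chars.join, List.intercalate]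
  rw [pv_intersperse_nil]
  congr 1
  apply List.map_congr_left
  intro ch _
  by_cases h0 : ch = '!'
  · subst h0; decide
  by_cases h1 : ch = '.'
  · subst h1; decide
  by_cases h2 : ch = ','
  · subst h2; decide
  by_cases h3 : ch = '?'
  · subst h3; decide
  by_cases h4 : ch = ';'
  · subst h4; decide
  by_cases h5 : ch = ':'
  · subst h5; decide
  by_cases h6 : ch = '-'
  · subst h6; decide
  by_cases h7 : ch = '\''
  · subst h7; decide
  by_cases h8 : ch = '\"'
  · subst h8; decide
  by_cases h9 : ch = '('
  · subst h9; decide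
  by_cases h10 : ch = ')'
  · subst h10; decide
  by_cases h11 : ch = '{'
  · subst h11; decide
  by_cases h12 : ch = '}'
  · subst h12; decide
  by_cases h13 : ch = '['
  · subst h13; decide
  by_cases h14 : ch = ']'
  · subst h14; decide
  by_cases h15 : ch = '<'
  · subst h15; decide
  by_cases h16 : ch = '>'
  · subst h16; decide
  simp [Function.comp_apply, pvPhrase, h0, h1, h2, h3, h4, h5, h6, h7, h8, h9, h10, h11, h12,
    h13, h14, h15, h16, String.toList_ofList]
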